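-- pv_equiv track=rewrite | github.com/greenwolf-nsk/yandex-cup-2022-recsys | lib/candidates/coocurence.py | train_triplet_model
-- ===== SOURCE A (Python) =====
-- from typing import List, Tuple, Dict
-- from collections import Counter, defaultdict
--
-- def train_triplet_model(data: List[List[int]], max_candidates: int = 300):
--     triples = defaultdict(Counter)
--     top_triples = {}
--
--     for record in data:
--         for i in range(len(record) - 2):
--             prev, last, ans = record[i], record[i + 1], record[i + 2]
--             triples[(prev, last)][ans] += 1
--
--     for key in triples:
--         top_triples[key] = triples[key].most_common(max_candidates)
--
--     return top_triples
-- ===== SOURCE B (Python) =====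
-- def train_triplet_model(data, max_candidates=300):
--     # one flat count of whole (prev, last, ans) triples
--     counts = {}
--     for record in data:
--         for i in range(len(record) - 2):
--             t = (record[i], record[i + 1], record[i + 2])
--             counts[t] = counts.get(t, 0) + 1
--
--     # group the counted triples by their leading pair
--     buckets = {}
--     for (prev, last, ans), c in counts.items():
--         buckets.setdefault((prev, last), []).append((ans, c))
--
--     return {key: _take_most_frequent(pairs, max_candidates)
--             for key, pairs in buckets.items()}
--
--
-- def _take_most_frequent(pairs, limit):
--     # counting sort on the frequency: bucket by count, then emit from the
--     # highest count down, stopping as soon as we have enough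
--     by_count = {}
--     top = 0
--     for pair in pairs:
--         by_count.setdefault(pair[1], []).append(pair)
--         if pair[1] > top:
--             top = pair[1]
--     out = []
--     for c in range(top, 0, -1):
--         for pair in by_count.get(c, []):
--             if len(out) >= limit:
--                 return out
--             out.append(pair)
--     return out
-- ===== Notes on version B (the rewrite author's own statement) =====
-- stated objective: alternative
-- what changed: Replaces the defaultdict-of-Counters plus per-key most_common (a comparison sort) with a flat triple count, a grouping pass by leading pair, and a counting sort: per key the (ans,count) pairs are bucketed by their count and emitted from the highest count downwards, stopping as soon as max_candidates items are out.
import Mathlib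
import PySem

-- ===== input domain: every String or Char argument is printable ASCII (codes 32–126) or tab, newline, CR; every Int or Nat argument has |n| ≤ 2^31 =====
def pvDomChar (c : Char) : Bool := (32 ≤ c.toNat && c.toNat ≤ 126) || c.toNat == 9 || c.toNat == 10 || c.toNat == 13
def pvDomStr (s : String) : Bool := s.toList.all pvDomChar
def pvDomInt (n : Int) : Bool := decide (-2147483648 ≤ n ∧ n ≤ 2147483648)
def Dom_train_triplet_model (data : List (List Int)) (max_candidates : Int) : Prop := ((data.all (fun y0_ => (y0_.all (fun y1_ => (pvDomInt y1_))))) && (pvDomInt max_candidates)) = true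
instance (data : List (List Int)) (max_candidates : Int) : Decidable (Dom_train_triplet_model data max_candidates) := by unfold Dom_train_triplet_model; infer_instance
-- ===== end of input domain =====

-- B replaces the nested defaultdict-of-Counters and per-key most_common with a flat triple count,
-- a grouping pass by leading pair, and a counting sort on the frequency (bucket by count, emit from
-- the highest count down, stopping once enough candidates are out) — alternative algorithm, same cost.


-- ===== PORT A =====
-- Counter.most_common(n) = heapq.nlargest(n, items, key=count): stable sort by count descending,
-- first n elements; [] when n ≤ 0 (exact CPython semantics).
def pyMostCommon (c : PySem.Dict Int Int) (n : Int) : List (Int × Int) :=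
  if n ≤ 0 then [] else (PySem.List.sorted c.items (fun p => p.2) true).take n.toNat

def train_triplet_model (data : List (List Int)) (max_candidates : Int) : List (Int × Int × List (Int × Int)) :=
  -- triples = defaultdict(Counter); nested index loop, then most_common per key in insertion order
  let triples : PySem.Dict (Int × Int) (PySem.Dict Int Int) :=
    data.foldl (fun d record =>
      (PySem.List.pyRange 0 ((record.length : Int) - 2) 1).foldl (fun d i =>
        let prev := PySem.List.pyGetD record i 0      -- indices i, i+1, i+2 are in range: exact
        let last := PySem.List.pyGetD record (i + 1) 0
        let ans := PySem.List.pyGetD record (i + 2) 0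
        d.modify (prev, last) PySem.Dict.empty (fun c => c.modify ans 0 (· + 1))) d)
      PySem.Dict.empty
  triples.items.map (fun kv => (kv.1.1, kv.1.2, pyMostCommon kv.2 max_candidates))

-- ===== PORT B =====
-- inner 'for pair in by_count.get(c, []): if len(out) >= limit: return out; out.append(pair)'
-- (Sum.inl = the early 'return out' was taken, Sum.inr = the bucket was exhausted)
def pvEmitBucket (limit : Int) : List (Int × Int) → List (Int × Int) → (List (Int × Int)) ⊕ (List (Int × Int))
  | [], out => Sum.inr out
  | p :: ps, out => if limit ≤ (out.length : Int) then Sum.inl out else pvEmitBucket limit ps (out ++ [p])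

-- outer 'for c in range(top, 0, -1): …'
def pvEmit (byCount : PySem.Dict Int (List (Int × Int))) (limit : Int) : List Int → List (Int × Int) → List (Int × Int)
  | [], out => out
  | c :: cs, out =>
    match pvEmitBucket limit (byCount.getD c []) out with
    | Sum.inl done => done
    | Sum.inr out' => pvEmit byCount limit cs out'

-- _take_most_frequent(pairs, limit): counting sort on the frequency
def pyTakeMostFrequent (pairs : List (Int × Int)) (limit : Int) : List (Int × Int) :=
  let st := pairs.foldl (fun (st : PySem.Dict Int (List (Int × Int)) × Int) pair =>
      (st.1.modify pair.2 [] (· ++ [pair]), if pair.2 > st.2 then pair.2 else st.2))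
    (PySem.Dict.empty, 0)
  pvEmit st.1 limit (PySem.List.pyRange st.2 0 (-1)) []

def train_triplet_model_alt (data : List (List Int)) (max_candidates : Int) : List (Int × Int × List (Int × Int)) :=
  -- counts[t] = counts.get(t, 0) + 1 over whole (prev, last, ans) triples
  let counts : PySem.Dict (Int × Int × Int) Int :=
    data.foldl (fun d record =>
      (PySem.List.pyRange 0 ((record.length : Int) - 2) 1).foldl (fun d i =>
        let t := (PySem.List.pyGetD record i 0, PySem.List.pyGetD record (i + 1) 0,
                  PySem.List.pyGetD record (i + 2) 0)
        d.insert t (d.getD t 0 + 1)) d)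
      PySem.Dict.empty
  -- buckets.setdefault((prev, last), []).append((ans, c))
  let buckets : PySem.Dict (Int × Int) (List (Int × Int)) :=
    counts.items.foldl (fun b q =>
      b.modify (q.1.1, q.1.2.1) [] (· ++ [(q.1.2.2, q.2)])) PySem.Dict.empty
  buckets.items.map (fun kv => (kv.1.1, kv.1.2, pyTakeMostFrequent kv.2 max_candidates))

-- ===== PRECONDITION & SPEC =====
def Spec_train_triplet_model (data : List (List Int)) (max_candidates : Int) (out : List (Int × Int × List (Int × Int))) : Prop := out = train_triplet_model_alt data max_candidates
instance (data : List (List Int)) (max_candidates : Int) (out : List (Int × Int × List (Int × Int))) : Decidable (Spec_train_triplet_model data max_candidates out) := by unfold Spec_train_triplet_model; infer_instance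

-- ===== CLAIM (what is proved, stated in full; the proofs are below) =====
def Claim_equal_train_triplet_model : Prop := ∀ (data : List (List Int)) (max_candidates : Int), Dom_train_triplet_model data max_candidates → Spec_train_triplet_model data max_candidates (train_triplet_model data max_candidates)

-- ===== LEMMAS AND PROOFS =====

-- the stream of (prev, last, ans) triples, and A's loop step on it
def pvKey2 (t : Int × Int × Int) : Int × Int := (t.1, t.2.1)

def pvStepA (d : PySem.Dict (Int × Int) (PySem.Dict Int Int)) (t : Int × Int × Int) : PySem.Dict (Int × Int) (PySem.Dict Int Int) :=
  d.modify (t.1, t.2.1) PySem.Dict.empty (fun c => c.modify t.2.2 0 (· + 1))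

def pvStream (data : List (List Int)) : List (Int × Int × Int) :=
  data.flatMap (fun r =>
    (PySem.List.pyRange 0 ((r.length : Int) - 2) 1).map (fun i =>
      (PySem.List.pyGetD r i 0, PySem.List.pyGetD r (i + 1) 0, PySem.List.pyGetD r (i + 2) 0)))

-- answers recorded for one key, in stream order
def pvAns (ts : List (Int × Int × Int)) (k : Int × Int) : List Int :=
  (ts.filter (fun t => pvKey2 t == k)).map (fun t => t.2.2)

lemma A_char (data : List (List Int)) (n : Int) :
    train_triplet_model data n =
      ((pvStream data).foldl pvStepA PySem.Dict.empty).items.map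
        (fun kv => (kv.1.1, kv.1.2, pyMostCommon kv.2 n)) := by
  unfold train_triplet_model pvStream pvStepA
  rw [List.foldl_flatMap]
  simp only [List.foldl_map]

lemma B_char (data : List (List Int)) (n : Int) :
    train_triplet_model_alt data n =
      (((PySem.Dict.counter (pvStream data)).items.foldl (fun b q =>
          b.modify (q.1.1, q.1.2.1) [] (· ++ [(q.1.2.2, q.2)])) PySem.Dict.empty).items.map
        (fun kv => (kv.1.1, kv.1.2, pyTakeMostFrequent kv.2 n))) := by
  unfold train_triplet_model_alt
  rw [← PySem.Dict.foldl_insert_getD_add_one_eq_counter]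
  unfold pvStream
  rw [List.foldl_flatMap]
  simp only [List.foldl_map]

lemma nested_getD (ts : List (Int × Int × Int)) (d : PySem.Dict (Int × Int) (PySem.Dict Int Int)) (k : Int × Int) :
    (ts.foldl pvStepA d).getD k PySem.Dict.empty =
      ((ts.filter (fun t => pvKey2 t == k)).map (fun t => t.2.2)).foldl
        (fun c a => c.modify a 0 (· + 1)) (d.getD k PySem.Dict.empty) := by
  induction ts generalizing d with
  | nil => rfl
  | cons t ts ih =>
    simp only [List.foldl_cons, List.filter_cons, ih]
    by_cases h : pvKey2 t = k
    · simp only [h, beq_self_eq_true, if_pos, List.map_cons, List.foldl_cons, pvStepA]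
      have hkk : (t.1, t.2.1) = k := h
      rw [hkk, PySem.Dict.getD_modify_self]
    · have hb : (pvKey2 t == k) = false := beq_eq_false_iff_ne.mpr h
      simp only [hb, Bool.false_eq_true, if_neg, not_false_iff, pvStepA]
      congr 1
      have hkk : (t.1, t.2.1) = pvKey2 t := rfl
      rw [hkk, PySem.Dict.getD_modify_of_ne]
      exact fun hkk' => h hkk'.symm

lemma nested_getD_counter (ts : List (Int × Int × Int)) (k : Int × Int) :
    (ts.foldl pvStepA PySem.Dict.empty).getD k PySem.Dict.empty = PySem.Dict.counter (pvAns ts k) := by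
  rw [nested_getD, PySem.Dict.counter_eq_foldl, pvAns, PySem.Dict.getD_empty]

lemma nested_keys (ts : List (Int × Int × Int)) :
    (ts.foldl pvStepA PySem.Dict.empty).keys = PySem.Set.ofList (ts.map pvKey2) := by
  have h := PySem.Dict.keys_foldl_modify_key ts (fun t => (t.1, t.2.1))
      (PySem.Dict.empty : PySem.Dict Int Int)
      (fun _ (t : Int × Int × Int) => fun c : PySem.Dict Int Int => c.modify t.2.2 0 (· + 1))
      PySem.Dict.empty
  rw [PySem.Dict.keys_empty, PySem.Set.update_nil_left] at h
  have e1 : pvStepA = fun d (x : Int × Int × Int) =>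
      d.modify (x.1, x.2.1) PySem.Dict.empty fun c => c.modify x.2.2 0 (· + 1) := rfl
  have e2 : pvKey2 = fun t : Int × Int × Int => (t.1, t.2.1) := rfl
  rw [e1, e2]
  exact h

lemma nested_keys_nodup (ts : List (Int × Int × Int)) :
    (ts.foldl pvStepA PySem.Dict.empty).keys.Nodup := by
  exact PySem.Dict.nodup_keys_foldl_modify_key ts (fun t => (t.1, t.2.1)) PySem.Dict.empty
      (fun _ t => fun c => c.modify t.2.2 0 (· + 1)) PySem.Dict.empty
      (by rw [PySem.Dict.keys_empty]; exact List.nodup_nil)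

-- dedup commutes with filter
lemma ofList_filter {α : Type} [BEq α] [LawfulBEq α] (p : α → Bool) (l : List α) :
    PySem.Set.ofList (l.filter p) = (PySem.Set.ofList l).filter p := by
  induction l using List.reverseRecOn with
  | nil => rfl
  | append_singleton l x ih =>
    rw [List.filter_append, PySem.Set.ofList_append_singleton, PySem.Set.add_eq_ite]
    by_cases hp : p x
    · rw [show List.filter p [x] = [x] from by simp [hp]]
      by_cases hx : x ∈ l
      · rw [if_pos (PySem.Set.mem_ofList l x |>.mpr hx), PySem.Set.ofList_append_singleton,
          PySem.Set.add_eq_ite, if_pos, ih]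
        rw [PySem.Set.mem_ofList]
        exact List.mem_filter.mpr ⟨hx, hp⟩
      · rw [if_neg (fun h => hx ((PySem.Set.mem_ofList l x).mp h)), List.filter_append,
          PySem.Set.ofList_append_singleton, PySem.Set.add_eq_ite, if_neg, ih]
        · simp [hp]
        · rw [PySem.Set.mem_ofList]
          intro h
          exact hx (List.mem_filter.mp h).1
    · rw [show List.filter p [x] = ([] : List α) from by simp [hp], List.append_nil]
      by_cases hx : x ∈ l
      · rw [if_pos (PySem.Set.mem_ofList l x |>.mpr hx), ih]
      · rw [if_neg (fun h => hx ((PySem.Set.mem_ofList l x).mp h)), List.filter_append, ih]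
        simp [hp]

-- dedup commutes with a map that is injective on the list
lemma ofList_map_inj {α β : Type} [BEq α] [LawfulBEq α] [BEq β] [LawfulBEq β]
    (f : α → β) (l : List α) (hinj : ∀ a ∈ l, ∀ b ∈ l, f a = f b → a = b) :
    PySem.Set.ofList (l.map f) = (PySem.Set.ofList l).map f := by
  induction l using List.reverseRecOn with
  | nil => rfl
  | append_singleton l x ih =>
    have hinj' : ∀ a ∈ l, ∀ b ∈ l, f a = f b → a = b := fun a ha b hb =>
      hinj a (List.mem_append_left _ ha) b (List.mem_append_left _ hb)
    rw [List.map_append, List.map_singleton, PySem.Set.ofList_append_singleton,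
      PySem.Set.ofList_append_singleton, PySem.Set.add_eq_ite, PySem.Set.add_eq_ite]
    by_cases hx : x ∈ l
    · rw [if_pos (PySem.Set.mem_ofList l x |>.mpr hx), if_pos, ih hinj']
      rw [PySem.Set.mem_ofList]
      exact List.mem_map_of_mem hx
    · rw [if_neg (fun h => hx ((PySem.Set.mem_ofList l x).mp h)), if_neg, List.map_append,
        List.map_singleton, ih hinj']
      rw [PySem.Set.mem_ofList]
      intro h
      obtain ⟨a, ha, hfa⟩ := List.mem_map.mp h
      exact hx (hinj a (List.mem_append_left _ ha) x
        (List.mem_append_right _ (List.mem_singleton_self x)) hfa ▸ ha)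

-- dedup of dedup-then-map
lemma ofList_map_ofList {α β : Type} [BEq α] [LawfulBEq α] [BEq β] [LawfulBEq β]
    (f : α → β) (l : List α) :
    PySem.Set.ofList ((PySem.Set.ofList l).map f) = PySem.Set.ofList (l.map f) := by
  induction l using List.reverseRecOn with
  | nil => rfl
  | append_singleton l x ih =>
    rw [PySem.Set.ofList_append_singleton, PySem.Set.add_eq_ite, List.map_append,
      List.map_singleton, PySem.Set.ofList_append_singleton]
    by_cases hx : x ∈ l
    · rw [if_pos (PySem.Set.mem_ofList l x |>.mpr hx), ih, PySem.Set.add_eq_ite, if_pos]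
      rw [PySem.Set.mem_ofList]
      exact List.mem_map_of_mem hx
    · rw [if_neg (fun h => hx ((PySem.Set.mem_ofList l x).mp h)), List.map_append,
        List.map_singleton, PySem.Set.ofList_append_singleton, ih]

-- a triple's global multiplicity is its answer's multiplicity within its key
lemma count_ans (ts : List (Int × Int × Int)) (k : Int × Int) (t : Int × Int × Int)
    (hk : pvKey2 t = k) : (pvAns ts k).count t.2.2 = ts.count t := by
  unfold pvAns
  rw [List.count_eq_countP, List.countP_map, List.countP_filter, List.count_eq_countP]
  apply List.countP_congr
  intro u _
  simp only [Function.comp, beq_iff_eq, Bool.and_eq_true]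
  constructor
  · rintro ⟨h22, hqk⟩
    obtain ⟨u1, u2, u3⟩ := u
    obtain ⟨t1, t2, t3⟩ := t
    simp only [pvKey2] at hqk hk
    rw [← hk] at hqk
    simp only [Prod.mk.injEq] at hqk ⊢
    exact ⟨hqk.1, hqk.2, h22⟩
  · rintro rfl
    exact ⟨rfl, hk⟩

-- the bucket built from the flat counter is exactly the per-key Counter's items
lemma bucket_eq (ts : List (Int × Int × Int)) (k : Int × Int) :
    ((PySem.Set.ofList ts).filter (fun t => pvKey2 t == k)).map (fun t => (t.2.2, (ts.count t : Int))) =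
      (PySem.Dict.counter (pvAns ts k)).items := by
  rw [PySem.Dict.items_counter, ← ofList_filter]
  have hinj : ∀ a ∈ ts.filter (fun t => pvKey2 t == k), ∀ b ∈ ts.filter (fun t => pvKey2 t == k),
      a.2.2 = b.2.2 → a = b := by
    intro a ha b hb h
    have hak : pvKey2 a = k := beq_iff_eq.mp (List.mem_filter.mp ha).2
    have hbk : pvKey2 b = k := beq_iff_eq.mp (List.mem_filter.mp hb).2
    obtain ⟨a1, a2, a3⟩ := a
    obtain ⟨b1, b2, b3⟩ := b
    rw [← hbk] at hak
    simp only [pvKey2, Prod.mk.injEq] at hak ⊢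
    exact ⟨hak.1, hak.2, h⟩
  have hmap : pvAns ts k = (ts.filter (fun t => pvKey2 t == k)).map (fun t => t.2.2) := rfl
  rw [hmap, ofList_map_inj _ _ hinj, List.map_map]
  apply List.map_congr_left
  intro u hu
  have hu' : u ∈ ts.filter (fun t => pvKey2 t == k) := (PySem.Set.mem_ofList _ _).mp hu
  have hku : pvKey2 u = k := beq_iff_eq.mp (List.mem_filter.mp hu').2
  simp only [Function.comp]
  rw [← hmap, count_ans ts k u hku]

-- the whole bucket dict of B, per key
lemma buckets_getD (ts : List (Int × Int × Int)) (k : Int × Int) :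
    ((((PySem.Dict.counter ts).items.map (fun q => ((q.1.1, q.1.2.1), (q.1.2.2, q.2)))).foldl
        (fun b p => b.modify p.1 [] (· ++ [p.2])) PySem.Dict.empty)).getD k [] =
      (PySem.Dict.counter (pvAns ts k)).items := by
  rw [PySem.Dict.getD_foldl_modify_append, PySem.Dict.getD_empty, List.nil_append,
    PySem.Dict.items_counter, List.map_map, List.filter_map, List.map_map]
  rw [← bucket_eq ts k]
  rfl

-- ----- counting-sort selection = most_common -----

-- range(top, 0, -1) spelled out
lemma pyRange_down (t : Int) :
    PySem.List.pyRange t 0 (-1) = (List.range t.toNat).map (fun k : Nat => t - (k : Int)) := by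
  rw [PySem.List.pyRange]
  rw [if_neg (by norm_num : (-1 : Int) ≠ 0)]
  simp only [show ¬ (0:Int) < -1 by norm_num, if_false]
  by_cases h : (0:Int) < t
  · rw [if_pos h]
    have he : (t - 0 + -(-1) - 1) / -(-1) = t := by norm_num
    rw [he]
    exact List.map_congr_left (fun k _ => by ring)
  · rw [if_neg h]
    have ht : t.toNat = 0 := by omega
    simp [ht]

lemma mem_pyRange_down (t v : Int) : v ∈ PySem.List.pyRange t 0 (-1) ↔ 1 ≤ v ∧ v ≤ t := by
  rw [pyRange_down]
  simp only [List.mem_map, List.mem_range]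
  constructor
  · rintro ⟨k, hk, rfl⟩; omega
  · rintro ⟨h1, h2⟩; exact ⟨(t - v).toNat, by omega, by omega⟩

lemma pairwise_pyRange_down (t : Int) :
    (PySem.List.pyRange t 0 (-1)).Pairwise (fun a b => b < a) := by
  rw [pyRange_down]
  exact List.pairwise_map.mpr (List.pairwise_lt_range.imp (fun h => by omega))

-- running max: bounds
lemma foldl_top_ge (ps : List (Int × Int)) (t0 : Int) :
    t0 ≤ ps.foldl (fun t p => if p.2 > t then p.2 else t) t0 := by
  induction ps generalizing t0 with
  | nil => simp
  | cons p ps ih =>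
    simp only [List.foldl_cons]
    refine le_trans ?_ (ih _)
    split_ifs with h <;> omega

lemma le_foldl_top (ps : List (Int × Int)) (t0 : Int) (p : Int × Int) :
    p ∈ ps → p.2 ≤ ps.foldl (fun t q => if q.2 > t then q.2 else t) t0 := by
  induction ps generalizing t0 with
  | nil => intro hp; cases hp
  | cons q ps ih =>
    intro hp
    simp only [List.foldl_cons]
    rcases List.mem_cons.mp hp with h | h
    · subst h
      refine le_trans ?_ (foldl_top_ge ps _)
      split_ifs with h2 <;> omega
    · exact ih _ h

-- insertBy passes over elements it does not go before
lemma insertBy_append_not {α : Type} (before : α → α → Bool) (x : α) (as bs : List α)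
    (h : ∀ a ∈ as, before x a = false) :
    PySem.List.insertBy before x (as ++ bs) = as ++ PySem.List.insertBy before x bs := by
  induction as with
  | nil => rfl
  | cons a as ih =>
    simp only [List.cons_append, PySem.List.insertBy, h a (List.mem_cons_self),
      Bool.false_eq_true, if_false]
    rw [ih (fun a' ha' => h a' (List.mem_cons_of_mem _ ha'))]

-- insertBy goes before everything it compares before
lemma insertBy_all_before {α : Type} (before : α → α → Bool) (x : α) (l : List α)
    (h : ∀ z ∈ l, before x z = true) :
    PySem.List.insertBy before x l = x :: l := by
  cases l with
  | nil => rfl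
  | cons z l => simp [PySem.List.insertBy, h z (List.mem_cons_self)]

-- stable descending insertion into a list bucketed by strictly decreasing key values:
-- the new element lands at the end of its own bucket
lemma insertBy_flatMap {α : Type} (key : α → Int) (x : α) (vs : List Int) (F : Int → List α)
    (hvs : vs.Pairwise (fun a b => b < a)) (hx : key x ∈ vs)
    (hF : ∀ v ∈ vs, ∀ y ∈ F v, key y = v) :
    PySem.List.insertBy (fun a b => decide (key b < key a)) x (vs.flatMap F) =
      vs.flatMap (fun v => F v ++ if key x = v then [x] else []) := by
  induction vs with
  | nil => cases hx
  | cons v vs ih =>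
    have hlt : ∀ v' ∈ vs, v' < v := fun v' hv' => (List.pairwise_cons.mp hvs).1 v' hv'
    have hvs' := (List.pairwise_cons.mp hvs).2
    simp only [List.flatMap_cons]
    by_cases hxv : key x = v
    · -- x belongs to the head bucket: skip F v, then go before everything after it
      rw [insertBy_append_not _ _ _ _ (fun y hy => by
        have := hF v (List.mem_cons_self) y hy
        simp [this, hxv])]
      rw [insertBy_all_before _ _ _ (fun z hz => by
        obtain ⟨v', hv', hzv'⟩ := List.mem_flatMap.mp hz
        have := hF v' (List.mem_cons_of_mem _ hv') z hzv'
        have hv'v := hlt v' hv'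
        simp only [decide_eq_true_eq, this, hxv]
        omega)]
      rw [if_pos hxv]
      have hrest : vs.flatMap (fun v' => F v' ++ if key x = v' then [x] else []) = vs.flatMap F := by
        apply List.flatMap_congr
        intro v' hv'
        rw [if_neg (by have := hlt v' hv'; omega), List.append_nil]
      rw [hrest]
      simp
    · -- x belongs to a later bucket: skip F v entirely
      have hx' : key x ∈ vs := by
        rcases List.mem_cons.mp hx with h | h
        · exact absurd h hxv
        · exact h
      rw [insertBy_append_not _ _ _ _ (fun y hy => by
        have hyv := hF v (List.mem_cons_self) y hy
        have : key x < v := by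
          have := hlt _ hx'
          omega
        simp only [decide_eq_false_iff_not, hyv]
        omega)]
      rw [ih hvs' hx' (fun v' hv' => hF v' (List.mem_cons_of_mem _ hv')), if_neg hxv,
        List.append_nil]

-- the stable descending sort is the concatenation of the count buckets, highest first
lemma sorted_rev_eq_flatMap {α : Type} (key : α → Int) (xs : List α) (vs : List Int)
    (hvs : vs.Pairwise (fun a b => b < a)) (hcov : ∀ x ∈ xs, key x ∈ vs) :
    PySem.List.sorted xs key true = vs.flatMap (fun v => xs.filter (fun y => key y == v)) := by
  induction xs using List.reverseRecOn with
  | nil =>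
    rw [show PySem.List.sorted ([] : List α) key true = [] from rfl]
    symm
    simp
  | append_singleton xs x ih =>
    rw [PySem.List.sorted_rev_eq_foldl_insertBy, List.foldl_append, List.foldl_cons,
      List.foldl_nil, ← PySem.List.sorted_rev_eq_foldl_insertBy,
      ih (fun y hy => hcov y (List.mem_append_left _ hy))]
    rw [insertBy_flatMap key x vs _ hvs (hcov x (List.mem_append_right _ (List.mem_singleton_self x)))
      (fun v _ y hy => beq_iff_eq.mp (List.mem_filter.mp hy).2)]
    apply List.flatMap_congr
    intro v _
    rw [List.filter_append]
    congr 1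
    by_cases h : key x = v
    · simp [h]
    · simp [h, beq_eq_false_iff_ne.mpr h]

-- the inner bucket loop, solved
lemma emitBucket_eq (limit : Int) (ps out : List (Int × Int)) :
    pvEmitBucket limit ps out =
      if ps ≠ [] ∧ limit < (out.length : Int) + ps.length
      then Sum.inl (out ++ ps.take (limit - out.length).toNat)
      else Sum.inr (out ++ ps) := by
  induction ps generalizing out with
  | nil => simp [pvEmitBucket]
  | cons p ps ih =>
    rw [pvEmitBucket]
    by_cases h : limit ≤ (out.length : Int)
    · rw [if_pos h, if_pos ⟨List.cons_ne_nil _ _, by simp; omega⟩]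
      have h0 : (limit - out.length).toNat = 0 := by omega
      simp [h0]
    · rw [if_neg h, ih]
      by_cases hps : ps = []
      · subst hps
        rw [if_neg (by simp), if_neg (by simp; omega)]
        simp
      · by_cases hc : limit < (out.length : Int) + 1 + ps.length
        · rw [if_pos ⟨hps, by simp; omega⟩, if_pos ⟨List.cons_ne_nil _ _, by simp; omega⟩]
          have hsucc : (limit - out.length).toNat = (limit - (out ++ [p]).length).toNat + 1 := by
            simp only [List.length_append, List.length_cons, List.length_nil]
            omega
          rw [hsucc, List.take_succ_cons]
          simp
        · rw [if_neg (by
            simp only [List.length_append, List.length_cons, List.length_nil, ne_eq]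
            push_neg
            intro _
            push_cast
            omega), if_neg (by
            simp only [List.length_cons, ne_eq]
            push_neg
            intro _
            push_cast
            omega)]
          simp

-- the outer emission loop is a take over the concatenated buckets
lemma pvEmit_eq (byCount : PySem.Dict Int (List (Int × Int))) (limit : Int)
    (cs : List Int) (out : List (Int × Int)) :
    pvEmit byCount limit cs out =
      out ++ (cs.flatMap (fun c => byCount.getD c [])).take ((limit - out.length).toNat) := by
  induction cs generalizing out with
  | nil => simp [pvEmit]
  | cons c cs ih =>
    rw [pvEmit]
    by_cases hcond : byCount.getD c [] ≠ [] ∧ limit < (out.length : Int) + (byCount.getD c []).length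
    · rw [show pvEmitBucket limit (byCount.getD c []) out =
          Sum.inl (out ++ (byCount.getD c []).take (limit - out.length).toNat) from by
        rw [emitBucket_eq, if_pos hcond]]
      show out ++ (byCount.getD c []).take (limit - out.length).toNat = _
      simp only [List.flatMap_cons]
      rw [List.take_append]
      have hn : (limit - out.length).toNat - (byCount.getD c []).length = 0 := by omega
      rw [hn]
      simp
    · rw [show pvEmitBucket limit (byCount.getD c []) out =
          Sum.inr (out ++ byCount.getD c []) from by
        rw [emitBucket_eq, if_neg hcond]]
      show pvEmit byCount limit cs (out ++ byCount.getD c []) = _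
      rw [ih]
      simp only [List.flatMap_cons]
      rw [List.take_append]
      have hor : byCount.getD c [] = [] ∨ (out.length : Int) + (byCount.getD c []).length ≤ limit := by
        by_cases h1 : byCount.getD c [] = []
        · exact Or.inl h1
        · exact Or.inr (by have := hcond; push_neg at this; have := this h1; omega)
      have hfull : (byCount.getD c []).take (limit - out.length).toNat = byCount.getD c [] := by
        rcases hor with h1 | h1
        · simp [h1]
        · exact List.take_of_length_le (by omega)
      have hlen : (limit - (out ++ byCount.getD c []).length).toNat =
          (limit - out.length).toNat - (byCount.getD c []).length := by
        simp only [List.length_append]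
        rcases hor with h1 | h1
        · simp [h1]
        · omega
      rw [hfull, hlen, List.append_assoc]

-- per-key: the counting-sort selection equals most_common
lemma take_top (l : List Int) (n : Int) :
    pyMostCommon (PySem.Dict.counter l) n = pyTakeMostFrequent (PySem.Dict.counter l).items n := by
  have hpos : ∀ p ∈ (PySem.Dict.counter l).items, 1 ≤ p.2 := by
    intro p hp
    rw [PySem.Dict.items_counter] at hp
    obtain ⟨a, ha, rfl⟩ := List.mem_map.mp hp
    have : a ∈ l := (PySem.Set.mem_ofList l a).mp ha
    have := List.count_pos_iff.mpr this
    simp only []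
    omega
  have hst : (List.foldl (fun (st : PySem.Dict Int (List (Int × Int)) × Int) pair =>
      (st.1.modify pair.2 [] (· ++ [pair]), if pair.2 > st.2 then pair.2 else st.2))
      (PySem.Dict.empty, 0) (PySem.Dict.counter l).items) =
      ((PySem.Dict.counter l).items.foldl (fun d pair => d.modify pair.2 [] (· ++ [pair]))
        PySem.Dict.empty,
       (PySem.Dict.counter l).items.foldl (fun t pair => if pair.2 > t then pair.2 else t) 0) :=
    PySem.List.foldl_prod_mk
      (fun (d : PySem.Dict Int (List (Int × Int))) (pair : Int × Int) =>
        d.modify pair.2 [] (· ++ [pair]))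
      (fun (t : Int) (pair : Int × Int) => if pair.2 > t then pair.2 else t)
      (PySem.Dict.counter l).items PySem.Dict.empty 0
  have hB : pyTakeMostFrequent (PySem.Dict.counter l).items n =
      pvEmit ((PySem.Dict.counter l).items.foldl (fun d pair => d.modify pair.2 [] (· ++ [pair]))
        PySem.Dict.empty) n
        (PySem.List.pyRange
          ((PySem.Dict.counter l).items.foldl (fun t pair => if pair.2 > t then pair.2 else t) 0)
          0 (-1)) [] := by
    unfold pyTakeMostFrequent
    rw [hst]
  rw [hB, pvEmit_eq]
  have hdict : ∀ c : Int, ((PySem.Dict.counter l).items.foldl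
      (fun d pair => d.modify pair.2 [] (· ++ [pair])) PySem.Dict.empty).getD c [] =
      (PySem.Dict.counter l).items.filter (fun p => p.2 == c) := by
    intro c
    rw [show ((PySem.Dict.counter l).items.foldl
        (fun d pair => d.modify pair.2 [] (· ++ [pair])) PySem.Dict.empty) =
        (((PySem.Dict.counter l).items.map (fun p => (p.2, p))).foldl
        (fun d q => d.modify q.1 [] (· ++ [q.2])) PySem.Dict.empty) from by
      rw [List.foldl_map]]
    rw [PySem.Dict.getD_foldl_modify_append, PySem.Dict.getD_empty, List.nil_append,
      List.filter_map, List.map_map]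
    simp only [Function.comp_def]
    exact List.map_id' _
  set pairs := (PySem.Dict.counter l).items with hpairs
  set top := pairs.foldl (fun t q => if q.2 > t then q.2 else t) 0 with htop
  have hflat : (PySem.List.pyRange top 0 (-1)).flatMap (fun c =>
      ((pairs.foldl (fun d pair => d.modify pair.2 [] (· ++ [pair])) PySem.Dict.empty).getD c [])) =
      (PySem.List.pyRange top 0 (-1)).flatMap (fun c => pairs.filter (fun p => p.2 == c)) :=
    List.flatMap_congr (fun c _ => hdict c)
  rw [hflat]
  have hsorted : PySem.List.sorted pairs (fun p => p.2) true =
      (PySem.List.pyRange top 0 (-1)).flatMap (fun c => pairs.filter (fun p => p.2 == c)) := by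
    apply sorted_rev_eq_flatMap
    · exact pairwise_pyRange_down top
    · intro p hp
      rw [mem_pyRange_down]
      exact ⟨hpos p hp, le_foldl_top pairs 0 p hp⟩
  rw [pyMostCommon, ← hsorted]
  by_cases hn : n ≤ 0
  · rw [if_pos hn]
    have h0 : (n - ([] : List (Int × Int)).length).toNat = 0 := by simp; omega
    rw [h0]
    simp
  · rw [if_neg hn]
    have hN : (n - ([] : List (Int × Int)).length).toNat = n.toNat := by simp
    rw [hN, ← hpairs]
    simp

-- ===== VERDICT (by name: the statement is the Claim_ definition above) =====
theorem train_triplet_model_spec : Claim_equal_train_triplet_model := by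
  intro data n _
  show train_triplet_model data n = train_triplet_model_alt data n
  rw [A_char, B_char]
  have hL : (PySem.Dict.counter (pvStream data)).items.foldl (fun b q =>
        b.modify (q.1.1, q.1.2.1) [] (· ++ [(q.1.2.2, q.2)])) PySem.Dict.empty
      = ((PySem.Dict.counter (pvStream data)).items.map
          (fun q => ((q.1.1, q.1.2.1), (q.1.2.2, q.2)))).foldl
        (fun b p => b.modify p.1 [] (· ++ [p.2])) PySem.Dict.empty := by
    rw [List.foldl_map]
  rw [hL]
  have hnodupB : (((PySem.Dict.counter (pvStream data)).items.map
      (fun q => ((q.1.1, q.1.2.1), (q.1.2.2, q.2)))).foldl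
        (fun b p => b.modify p.1 [] (· ++ [p.2])) PySem.Dict.empty).keys.Nodup :=
    PySem.Dict.nodup_keys_foldl_modify_key _
      (fun p : (Int × Int) × (Int × Int) => p.1) []
      (fun _ (p : (Int × Int) × (Int × Int)) => fun v => v ++ [p.2])
      PySem.Dict.empty (by rw [PySem.Dict.keys_empty]; exact List.nodup_nil)
  have hkeysB : (((PySem.Dict.counter (pvStream data)).items.map
      (fun q => ((q.1.1, q.1.2.1), (q.1.2.2, q.2)))).foldl
        (fun b p => b.modify p.1 [] (· ++ [p.2])) PySem.Dict.empty).keys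
      = PySem.Set.ofList ((pvStream data).map pvKey2) := by
    have h := PySem.Dict.keys_foldl_modify_key ((PySem.Dict.counter (pvStream data)).items.map
        (fun q => ((q.1.1, q.1.2.1), (q.1.2.2, q.2))))
        (fun p : (Int × Int) × (Int × Int) => p.1) ([] : List (Int × Int))
        (fun _ (p : (Int × Int) × (Int × Int)) => fun v => v ++ [p.2]) PySem.Dict.empty
    rw [PySem.Dict.keys_empty, PySem.Set.update_nil_left] at h
    rw [h, List.map_map, PySem.Dict.items_counter, List.map_map,
      ← ofList_map_ofList pvKey2 (pvStream data)]
    rfl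
  rw [PySem.Dict.items_eq_map_keys _ (nested_keys_nodup (pvStream data)) PySem.Dict.empty,
    nested_keys, PySem.Dict.items_eq_map_keys _ hnodupB [], hkeysB, List.map_map, List.map_map]
  apply List.map_congr_left
  intro k _
  simp only [Function.comp]
  rw [nested_getD_counter, buckets_getD, take_top]
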